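-- pv_equiv track=rewrite | github.com/icode100/LeetCode_Practice | Striver_SDE_SHEET/3491-find-the-maximum-length-of-valid-subsequence-ii/find-the-maximum-length-of-valid-subsequence-ii.py | maximumLength
-- ===== SOURCE A (Python) =====
-- from typing import List
--
-- def maximumLength(nums: List[int], k: int) -> int:
--     nums = list(map(lambda x:x%k,nums))
--     dp = {}
--     N = len(nums)
--     for i in range(N):
--         dp[i] = {}
--         for j in range(i):
--             dp[i][nums[i]+nums[j]] = 1+dp[j].get(nums[i]+nums[j],1)
--     return max(max(dp[i].values()) for i in dp.keys() if len(dp[i])>0)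
-- ===== SOURCE B (Python) =====
-- def maximumLength(nums, k):
--     # One row per residue (the row of its last occurrence) instead of one row per index.
--     d = {}
--     ans = 0
--     for x in nums:
--         a = x % k
--         row = {a + b: 1 + rb.get(a + b, 1) for b, rb in d.items()}
--         if row:
--             ans = max(ans, max(row.values()))
--         d[a] = row
--     return ans
-- ===== Notes on version B (the rewrite author's own statement) =====
-- stated objective: faster
-- what changed: B replaces A's per-index dict-of-dicts (inner loop over all previous indices and a final max over all rows) with a single pass keeping one DP row per residue class (the row of the residue's last occurrence) and a running maximum, so the inner loop runs over at most min(n,|k|) distinct residues instead of i indices.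
import Mathlib
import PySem

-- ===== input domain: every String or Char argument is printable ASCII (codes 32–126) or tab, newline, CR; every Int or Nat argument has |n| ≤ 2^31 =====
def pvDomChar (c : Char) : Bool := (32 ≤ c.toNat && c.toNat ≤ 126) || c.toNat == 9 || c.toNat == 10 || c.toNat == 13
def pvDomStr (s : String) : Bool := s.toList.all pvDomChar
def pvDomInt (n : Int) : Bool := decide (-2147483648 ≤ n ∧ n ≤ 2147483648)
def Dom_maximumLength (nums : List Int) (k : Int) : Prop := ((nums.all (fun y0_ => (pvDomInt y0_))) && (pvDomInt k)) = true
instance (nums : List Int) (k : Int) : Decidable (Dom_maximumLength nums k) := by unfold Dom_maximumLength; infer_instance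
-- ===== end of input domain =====

-- B keeps one DP row per residue (the row of its last occurrence) instead of one row per
-- index, so the inner loop runs over distinct residues, not over all previous indices.

-- ===== PORT A =====
-- List indices i, j are always in range (j < i < len), so List.getD is exact here.
def maximumLength (nums : List Int) (k : Int) : Int :=
  let nums2 := nums.map (fun x => PySem.Int.mod x k)
  let N := nums2.length
  let dp : PySem.Dict Nat (PySem.Dict Int Int) :=
    (List.range N).foldl (fun dp i =>
      (List.range i).foldl (fun dp j =>
        dp.insert i ((dp.getD i PySem.Dict.empty).insert (nums2.getD i 0 + nums2.getD j 0)
          (1 + (dp.getD j PySem.Dict.empty).getD (nums2.getD i 0 + nums2.getD j 0) 1)))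
        (dp.insert i PySem.Dict.empty)) PySem.Dict.empty
  let maxes := (dp.items.filter (fun p => 0 < p.2.size)).map
      (fun p => (PySem.List.max? p.2.values (fun v => v)).getD 0)
  (PySem.List.max? maxes (fun v => v)).getD 0

-- ===== PORT B =====
def maximumLength_alt (nums : List Int) (k : Int) : Int :=
  (nums.foldl (fun (st : PySem.Dict Int (PySem.Dict Int Int) × Int) x =>
      let a := PySem.Int.mod x k
      let row := st.1.items.foldl
        (fun r p => r.insert (a + p.1) (1 + p.2.getD (a + p.1) 1)) PySem.Dict.empty
      (st.1.insert a row,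
       if 0 < row.size then max st.2 ((PySem.List.max? row.values (fun v => v)).getD 0) else st.2))
    (PySem.Dict.empty, 0)).2

-- ===== PRECONDITION & SPEC =====
-- Pre_ excludes exactly the inputs where Python A raises: k = 0 (ZeroDivisionError in x % k)
-- and len(nums) < 2 (max() of an empty generator raises ValueError).
def Pre_maximumLength (nums : List Int) (k : Int) : Prop := k ≠ 0 ∧ 2 ≤ nums.length
instance (nums : List Int) (k : Int) : Decidable (Pre_maximumLength nums k) := by
  unfold Pre_maximumLength; infer_instance
def pvWitness_maximumLength : List Int × Int := ([1, 2, 3, 4], 3)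

def Spec_maximumLength (nums : List Int) (k : Int) (out : Int) : Prop := out = maximumLength_alt nums k
instance (nums : List Int) (k : Int) (out : Int) : Decidable (Spec_maximumLength nums k out) := by unfold Spec_maximumLength; infer_instance

-- ===== CLAIM (what is proved, stated in full; the proofs are below) =====
def Claim_equal_maximumLength : Prop := ∀ (nums : List Int) (k : Int), Dom_maximumLength nums k → Pre_maximumLength nums k → Spec_maximumLength nums k (maximumLength nums k)

-- ===== LEMMAS AND PROOFS =====

-- Residues of the input.
def pvRes (nums : List Int) (k : Int) : List Int := nums.map (fun x => PySem.Int.mod x k)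

-- A's dict-of-rows, as a recursion on the number of processed indices.
def mkRow (rs : List Int) (m : Nat) (d : PySem.Dict Nat (PySem.Dict Int Int)) : PySem.Dict Int Int :=
  (List.range m).foldl (fun r j =>
    r.insert (rs.getD m 0 + rs.getD j 0)
      (1 + (d.getD j PySem.Dict.empty).getD (rs.getD m 0 + rs.getD j 0) 1)) PySem.Dict.empty

def dpAfun (rs : List Int) : Nat → PySem.Dict Nat (PySem.Dict Int Int)
  | 0 => PySem.Dict.empty
  | m + 1 => (dpAfun rs m).insert m (mkRow rs m (dpAfun rs m))

def rowA (rs : List Int) (m : Nat) : PySem.Dict Int Int := mkRow rs m (dpAfun rs m)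

-- The per-row maximum A takes, and B's running answer model.
def rowMax (rs : List Int) (i : Nat) : Int :=
  (PySem.List.max? (rowA rs i).values (fun v => v)).getD 0

def modelD (rs : List Int) (m : Nat) : PySem.Dict Int (PySem.Dict Int Int) :=
  (List.range m).foldl (fun d j => d.insert (rs.getD j 0) (rowA rs j)) PySem.Dict.empty

def modelAns (rs : List Int) (m : Nat) : Int :=
  (List.range m).foldl (fun acc i =>
    if 0 < (rowA rs i).size then max acc (rowMax rs i) else acc) 0

-- The row-building fold B performs (over an association list of residue/row pairs).
def rowFold (a : Int) (qs : List (Int × PySem.Dict Int Int)) (r : PySem.Dict Int Int) : PySem.Dict Int Int :=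
  qs.foldl (fun r p => r.insert (a + p.1) (1 + p.2.getD (a + p.1) 1)) r

def dictOf (pl : List (Int × PySem.Dict Int Int)) : PySem.Dict Int (PySem.Dict Int Int) :=
  pl.foldl (fun d p => d.insert p.1 p.2) PySem.Dict.empty

-- A's inner loop only rewrites key m of the outer dict.
theorem innerA_eq (l : List Nat) (m : Nat) (hl : ∀ j ∈ l, j ≠ m)
    (d : PySem.Dict Nat (PySem.Dict Int Int)) (r0 : PySem.Dict Int Int) (f : Nat → Int) :
    l.foldl (fun dp j =>
        dp.insert m ((dp.getD m PySem.Dict.empty).insert (f j)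
          (1 + (dp.getD j PySem.Dict.empty).getD (f j) 1))) (d.insert m r0)
      = d.insert m (l.foldl (fun r j =>
          r.insert (f j) (1 + (d.getD j PySem.Dict.empty).getD (f j) 1)) r0) := by
  induction l generalizing r0 with
  | nil => rfl
  | cons j t ih =>
    have hj : j ≠ m := hl j (List.mem_cons_self)
    simp only [List.foldl_cons]
    rw [PySem.Dict.getD_insert, PySem.Dict.getD_insert]
    simp only [if_neg hj]
    rw [PySem.Dict.insert_insert_self]
    exact ih (fun x hx => hl x (List.mem_cons_of_mem _ hx)) _

theorem outerA_eq (rs : List Int) (N : Nat) :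
    (List.range N).foldl (fun dp i =>
      (List.range i).foldl (fun dp j =>
        dp.insert i ((dp.getD i PySem.Dict.empty).insert (rs.getD i 0 + rs.getD j 0)
          (1 + (dp.getD j PySem.Dict.empty).getD (rs.getD i 0 + rs.getD j 0) 1)))
        (dp.insert i PySem.Dict.empty)) PySem.Dict.empty = dpAfun rs N := by
  induction N with
  | zero => rfl
  | succ n ih =>
    rw [List.range_succ, List.foldl_append, ih, List.foldl_cons, List.foldl_nil]
    rw [innerA_eq (List.range n) n (fun j hj => Nat.ne_of_lt (List.mem_range.mp hj))]
    rfl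

theorem items_dpAfun (rs : List Int) (m : Nat) :
    (dpAfun rs m).items = (List.range m).map (fun i => (i, rowA rs i)) := by
  induction m with
  | zero => rfl
  | succ n ih =>
    have hkeys : (dpAfun rs n).keys = List.range n := by
      simp only [PySem.Dict.keys, ih, List.map_map]
      rw [List.map_congr_left (fun a _ => rfl :
        ∀ a ∈ List.range n, ((fun x => x.1) ∘ fun i => (i, rowA rs i)) a = id a)]
      exact List.map_id _
    have hc : (dpAfun rs n).contains n = false := by
      rw [PySem.Dict.contains_eq_decide_mem_keys, hkeys]
      simp
    show ((dpAfun rs n).insert n (mkRow rs n (dpAfun rs n))).items = _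
    rw [PySem.Dict.items_insert_of_not_contains _ _ hc, ih, List.range_succ, List.map_append]
    rfl

theorem getD_dpAfun (rs : List Int) {j m : Nat} (h : j < m) :
    (dpAfun rs m).getD j PySem.Dict.empty = rowA rs j := by
  induction m with
  | zero => omega
  | succ n ih =>
    show ((dpAfun rs n).insert n (mkRow rs n (dpAfun rs n))).getD j PySem.Dict.empty = _
    rw [PySem.Dict.getD_insert]
    by_cases hj : j = n
    · subst hj; simp [rowA]
    · rw [if_neg hj]; exact ih (by omega)

-- Inserting at an already-present key commutes (as items lists) with inserting at another key.
theorem insert_comm_items (d : PySem.Dict Int Int) (c b : Int) (w v : Int)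
    (hc : d.contains c = true) (hne : b ≠ c) :
    (d.insert c w).insert b v = (d.insert b v).insert c w := by
  apply PySem.Dict.ext
  have hcb : ((c == b : Bool)) = false := by simp [Ne.symm hne]
  have hbc : ((b == c : Bool)) = false := by simp [hne]
  by_cases hb : d.contains b = true
  · rw [PySem.Dict.items_insert_of_contains _ _ (by rw [PySem.Dict.contains_insert, hbc, hb]; rfl),
        PySem.Dict.items_insert_of_contains _ _ hc,
        PySem.Dict.items_insert_of_contains _ _ (by rw [PySem.Dict.contains_insert, hcb, hc]; rfl),
        PySem.Dict.items_insert_of_contains _ _ hb]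
    rw [List.map_map, List.map_map]
    apply List.map_congr_left
    intro p _
    simp only [Function.comp]
    by_cases h1 : p.1 = c
    · simp [h1, hcb, Ne.symm hne]
    · by_cases h2 : p.1 = b <;> simp [h1, h2, hne]
  · have hb' : d.contains b = false := by simp_all
    rw [PySem.Dict.items_insert_of_not_contains _ _ (by rw [PySem.Dict.contains_insert, hbc, hb']; rfl),
        PySem.Dict.items_insert_of_contains _ _ hc,
        PySem.Dict.items_insert_of_contains _ _ (by rw [PySem.Dict.contains_insert, hcb, hc]; rfl),
        PySem.Dict.items_insert_of_not_contains _ _ hb']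
    rw [List.map_append]
    simp [hbc, hne]

theorem rowFold_insert_comm (qs : List (Int × PySem.Dict Int Int)) (a : Int)
    (d : PySem.Dict Int Int) (c w : Int) (hc : d.contains c = true)
    (h : ∀ p ∈ qs, a + p.1 ≠ c) :
    (rowFold a qs d).insert c w = rowFold a qs (d.insert c w) := by
  induction qs generalizing d with
  | nil => rfl
  | cons p t ih =>
    have hp : a + p.1 ≠ c := h p List.mem_cons_self
    show (rowFold a t (d.insert (a + p.1) (1 + p.2.getD (a + p.1) 1))).insert c w
      = rowFold a t ((d.insert c w).insert (a + p.1) (1 + p.2.getD (a + p.1) 1))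
    rw [ih _ (by rw [PySem.Dict.contains_insert]; simp [hc])
          (fun q hq => h q (List.mem_cons_of_mem _ hq))]
    rw [insert_comm_items d c (a + p.1) w _ hc hp]

theorem rowFold_replace (qs : List (Int × PySem.Dict Int Int)) (a : Int) (b : Int)
    (rnew : PySem.Dict Int Int) (d : PySem.Dict Int Int)
    (hnd : (qs.map (·.1)).Nodup) (hb : b ∈ qs.map (·.1)) :
    rowFold a (qs.map (fun p => if p.1 == b then (b, rnew) else p)) d
      = (rowFold a qs d).insert (a + b) (1 + rnew.getD (a + b) 1) := by
  induction qs generalizing d with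
  | nil => simp at hb
  | cons p t ih =>
    simp only [List.map_cons, List.nodup_cons] at hnd
    rw [List.map_cons, List.mem_cons] at hb
    by_cases hpb : p.1 = b
    · have hnotin : ∀ q ∈ t, q.1 ≠ b := fun q hq e =>
        hnd.1 (by rw [hpb, ← e]; exact List.mem_map.mpr ⟨q, hq, rfl⟩)
      have hmap : List.map (fun p => if p.1 == b then (b, rnew) else p) t = List.map id t :=
        List.map_congr_left (fun q hq => by simp [hnotin q hq])
      rw [List.map_cons, hmap, List.map_id, if_pos (show (p.1 == b) = true by simp [hpb])]
      show rowFold a t (d.insert (a + b) (1 + rnew.getD (a + b) 1))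
        = (rowFold a t (d.insert (a + p.1) (1 + p.2.getD (a + p.1) 1))).insert (a + b)
            (1 + rnew.getD (a + b) 1)
      rw [rowFold_insert_comm t a _ (a + b) _
            (by rw [hpb, PySem.Dict.contains_insert]; simp)
            (fun q hq e => hnotin q hq (by omega))]
      rw [hpb, PySem.Dict.insert_insert_self]
    · have hbt : b ∈ t.map (·.1) := hb.resolve_left (fun e => hpb e.symm)
      rw [List.map_cons, if_neg (show ¬ (p.1 == b) = true by simp [hpb])]
      show rowFold a (t.map _) (d.insert (a + p.1) (1 + p.2.getD (a + p.1) 1)) = _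
      rw [ih _ hnd.2 hbt]
      rfl

theorem rowFold_dictOf (pl : List (Int × PySem.Dict Int Int)) (a : Int) :
    rowFold a pl PySem.Dict.empty = rowFold a (dictOf pl).items PySem.Dict.empty := by
  induction pl using List.reverseRecOn with
  | nil => rfl
  | append_singleton t q ih =>
    have hkeysnd : (dictOf t).keys.Nodup := by
      apply PySem.Dict.nodup_keys_foldl_insert_key t (fun p => p.1) (fun _ p => p.2)
      simp [PySem.Dict.keys_empty]
    have hdict : dictOf (t ++ [q]) = (dictOf t).insert q.1 q.2 := by
      simp [dictOf, List.foldl_append]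
    have hrow : rowFold a (t ++ [q]) PySem.Dict.empty
        = (rowFold a t PySem.Dict.empty).insert (a + q.1) (1 + q.2.getD (a + q.1) 1) := by
      simp [rowFold, List.foldl_append]
    rw [hrow, ih, hdict]
    by_cases hc : (dictOf t).contains q.1 = true
    · rw [PySem.Dict.items_insert_of_contains _ _ hc]
      rw [rowFold_replace _ a q.1 q.2 _ ?h1 ?h2]
      case h1 =>
        rw [show (dictOf t).items.map (·.1) = (dictOf t).keys from rfl]
        exact hkeysnd
      case h2 =>
        rw [show (dictOf t).items.map (·.1) = (dictOf t).keys from rfl]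
        rw [PySem.Dict.contains_eq_decide_mem_keys] at hc
        exact of_decide_eq_true hc
    · rw [PySem.Dict.items_insert_of_not_contains _ _ (by simp_all)]
      simp [rowFold, List.foldl_append]

def stepB (st : PySem.Dict Int (PySem.Dict Int Int) × Int) (a : Int) :
    PySem.Dict Int (PySem.Dict Int Int) × Int :=
  let row := st.1.items.foldl
    (fun r p => r.insert (a + p.1) (1 + p.2.getD (a + p.1) 1)) PySem.Dict.empty
  (st.1.insert a row,
   if 0 < row.size then max st.2 ((PySem.List.max? row.values (fun v => v)).getD 0) else st.2)

-- B's fold over the residue prefix reaches exactly (modelD, modelAns).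
theorem stB_eq (rs : List Int) (m : Nat) (hm : m ≤ rs.length) :
    (rs.take m).foldl stepB (PySem.Dict.empty, 0) = (modelD rs m, modelAns rs m) := by
  induction m with
  | zero => rfl
  | succ n ih =>
    have hn : n < rs.length := by omega
    rw [List.take_succ, List.getElem?_eq_getElem hn,
        show (some rs[n]).toList = [rs[n]] from rfl,
        List.foldl_append, ih (by omega), List.foldl_cons, List.foldl_nil]
    have ha : rs[n] = rs.getD n 0 := (List.getD_eq_getElem rs 0 hn).symm
    rw [ha]
    have hpl : modelD rs n = dictOf ((List.range n).map (fun j => (rs.getD j 0, rowA rs j))) := by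
      unfold modelD dictOf
      rw [List.foldl_map]
    have hrowpl : rowFold (rs.getD n 0) ((List.range n).map (fun j => (rs.getD j 0, rowA rs j)))
        PySem.Dict.empty = rowA rs n := by
      show ((List.range n).map (fun j => (rs.getD j 0, rowA rs j))).foldl
          (fun r p => r.insert (rs.getD n 0 + p.1) (1 + p.2.getD (rs.getD n 0 + p.1) 1))
          PySem.Dict.empty = rowA rs n
      rw [List.foldl_map]
      show _ = (List.range n).foldl (fun r j =>
          r.insert (rs.getD n 0 + rs.getD j 0)
            (1 + ((dpAfun rs n).getD j PySem.Dict.empty).getD (rs.getD n 0 + rs.getD j 0) 1))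
          PySem.Dict.empty
      apply PySem.List.foldl_congr_mem
      intro acc j hj
      show acc.insert (rs.getD n 0 + rs.getD j 0)
          (1 + (rowA rs j).getD (rs.getD n 0 + rs.getD j 0) 1) = _
      rw [getD_dpAfun rs (List.mem_range.mp hj)]
    have hrow : rowFold (rs.getD n 0) (modelD rs n).items PySem.Dict.empty = rowA rs n := by
      rw [hpl, ← rowFold_dictOf]
      exact hrowpl
    show ((modelD rs n).insert (rs.getD n 0) (rowFold (rs.getD n 0) (modelD rs n).items PySem.Dict.empty),
      if 0 < (rowFold (rs.getD n 0) (modelD rs n).items PySem.Dict.empty).size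
      then max (modelAns rs n) ((PySem.List.max? (rowFold (rs.getD n 0) (modelD rs n).items PySem.Dict.empty).values (fun v => v)).getD 0)
      else modelAns rs n) = (modelD rs (n + 1), modelAns rs (n + 1))
    rw [hrow]
    have h1 : (modelD rs n).insert (rs.getD n 0) (rowA rs n) = modelD rs (n + 1) := by
      unfold modelD
      rw [List.range_succ, List.foldl_append]
      rfl
    have h2 : (if 0 < (rowA rs n).size
        then max (modelAns rs n) ((PySem.List.max? (rowA rs n).values (fun v => v)).getD 0)
        else modelAns rs n) = modelAns rs (n + 1) := by
      unfold modelAns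
      rw [List.range_succ, List.foldl_append]
      rfl
    rw [h1, h2]

-- Every value stored in any row is ≥ 1.
theorem rowA_values_pos (rs : List Int) (i : Nat) :
    ∀ v ∈ (rowA rs i).values, 1 ≤ v := by
  induction i using Nat.strong_induction_on with
  | _ i ih =>
    have key : ∀ (l : List Nat), (∀ j ∈ l, j < i) → ∀ (r0 : PySem.Dict Int Int),
        (∀ v ∈ r0.values, 1 ≤ v) →
        ∀ v ∈ (l.foldl (fun r j => r.insert (rs.getD i 0 + rs.getD j 0)
            (1 + ((dpAfun rs i).getD j PySem.Dict.empty).getD (rs.getD i 0 + rs.getD j 0) 1)) r0).values,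
          1 ≤ v := by
      intro l
      induction l with
      | nil => exact fun _ r0 h0 v hv => h0 v hv
      | cons j t iht =>
        intro hlt r0 h0
        apply iht (fun x hx => hlt x (List.mem_cons_of_mem _ hx))
        intro v hv
        rcases PySem.Dict.mem_values_insert _ _ _ _ hv with h | h
        · subst h
          have hj : j < i := hlt j List.mem_cons_self
          rw [getD_dpAfun rs hj]
          rcases hg : (rowA rs j).get? (rs.getD i 0 + rs.getD j 0) with _ | u
          · rw [show (rowA rs j).getD (rs.getD i 0 + rs.getD j 0) 1
                = ((rowA rs j).get? (rs.getD i 0 + rs.getD j 0)).getD 1 from rfl, hg]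
            norm_num
          · have hu : u ∈ (rowA rs j).values :=
              List.mem_map.mpr ⟨_, PySem.Dict.mem_items_of_get?_eq_some _ hg, rfl⟩
            have h1u := ih j hj u hu
            rw [show (rowA rs j).getD (rs.getD i 0 + rs.getD j 0) 1
                = ((rowA rs j).get? (rs.getD i 0 + rs.getD j 0)).getD 1 from rfl, hg]
            show (1 : Int) ≤ 1 + u
            omega
        · exact h0 v h
    exact key (List.range i) (fun j hj => List.mem_range.mp hj) PySem.Dict.empty
      (fun v hv => absurd hv (List.not_mem_nil))

theorem pv_maxGetD_eq_foldl (l : List Int) (h : ∀ x ∈ l, 0 ≤ x) :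
    (PySem.List.max? l (fun v => v)).getD 0 = l.foldl max 0 := by
  cases l with
  | nil => rfl
  | cons x t =>
    rw [PySem.List.max?_id_cons]
    show t.foldl max x = t.foldl max (max 0 x)
    rw [max_eq_right (h x List.mem_cons_self)]

theorem final_eq (rs : List Int) (N : Nat) :
    (PySem.List.max? ((((List.range N).map (fun i => (i, rowA rs i))).filter
        (fun p => 0 < p.2.size)).map
        (fun (p : Nat × PySem.Dict Int Int) => (PySem.List.max? p.2.values (fun v => v)).getD 0)) (fun v => v)).getD 0
      = modelAns rs N := by
  rw [List.filter_map, List.map_map]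
  rw [show ((fun (p : Nat × PySem.Dict Int Int) => decide (0 < p.2.size)) ∘ fun i => (i, rowA rs i))
      = (fun i => decide (0 < (rowA rs i).size)) from rfl]
  rw [show ((fun (p : Nat × PySem.Dict Int Int) => (PySem.List.max? p.2.values (fun v => v)).getD 0) ∘ fun i => (i, rowA rs i))
      = (fun i => rowMax rs i) from rfl]
  have hpos : ∀ x ∈ ((List.range N).filter (fun i => decide (0 < (rowA rs i).size))).map
      (fun i => rowMax rs i), (0 : Int) ≤ x := by
    intro x hx
    rcases List.mem_map.mp hx with ⟨i, hi, rfl⟩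
    have hsz : 0 < (rowA rs i).size := of_decide_eq_true (List.mem_filter.mp hi).2
    have hne : (rowA rs i).values ≠ [] := by
      intro he
      have hlen : (rowA rs i).values.length = (rowA rs i).size := by
        rw [show (rowA rs i).values = (rowA rs i).items.map (·.2) from rfl, List.length_map]
        rfl
      rw [he] at hlen
      simp at hlen
      omega
    rcases hm : PySem.List.max? (rowA rs i).values (fun v => v) with _ | m
    · exact absurd ((PySem.List.max?_eq_none_iff _ _).mp hm) hne
    · have h1m := rowA_values_pos rs i m (PySem.List.max?_mem hm)
      unfold rowMax
      rw [hm]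
      show (0 : Int) ≤ m
      omega
  rw [pv_maxGetD_eq_foldl _ hpos, List.foldl_map, List.foldl_filter]
  unfold modelAns
  exact PySem.List.foldl_congr_mem _ _ _ _ (fun acc i _ => by simp)

theorem portA_eval (nums : List Int) (k : Int) :
    maximumLength nums k = modelAns (pvRes nums k) (pvRes nums k).length := by
  simp only [maximumLength]
  rw [show List.map (fun x => PySem.Int.mod x k) nums = pvRes nums k from rfl]
  rw [outerA_eq, items_dpAfun]
  exact final_eq _ _

theorem portB_eval (nums : List Int) (k : Int) :
    maximumLength_alt nums k = modelAns (pvRes nums k) (pvRes nums k).length := by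
  show (List.foldl (fun st x => stepB st (PySem.Int.mod x k)) (PySem.Dict.empty, 0) nums).2 = _
  rw [← List.foldl_map]
  have h := stB_eq (pvRes nums k) (pvRes nums k).length (le_refl _)
  rw [List.take_length] at h
  rw [show List.map (fun x => PySem.Int.mod x k) nums = pvRes nums k from rfl, h]

-- ===== VERDICT (by name: the statement is the Claim_ definition above) =====
theorem maximumLength_spec : Claim_equal_maximumLength := by
  intro nums k _ _
  unfold Spec_maximumLength
  rw [portA_eval, portB_eval]
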